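-- pv_equiv track=rewrite | github.com/misterjacko/advent-of-code | 2020/Day7/7-Handy_Haversacks.py | searchbags
-- ===== SOURCE A (Python) =====
-- def searchbags(querybags, A):
--   valid = []
--   for query in querybags:
--     for outerbag in A:
--       for innerbag in outerbag:
--         if query in outerbag[innerbag]:
--           valid.append(innerbag)
--   return valid
-- ===== SOURCE B (Python) =====
-- def searchbags(querybags, A):
--   # Reverse index: content bag -> containers (in A's iteration order), built once.
--   index = {}
--   for outerbag in A:
--     for innerbag in outerbag:
--       for content in dict.fromkeys(outerbag[innerbag]):
--         index.setdefault(content, []).append(innerbag)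
--   valid = []
--   for query in querybags:
--     valid += index.get(query, [])
--   return valid
-- ===== Notes on version B (the rewrite author's own statement) =====
-- stated objective: faster
-- what changed: B builds a reverse index (content bag -> list of containing bags) in one pass over A, then answers each query by a single dictionary lookup instead of rescanning all of A per query.
import Mathlib
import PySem

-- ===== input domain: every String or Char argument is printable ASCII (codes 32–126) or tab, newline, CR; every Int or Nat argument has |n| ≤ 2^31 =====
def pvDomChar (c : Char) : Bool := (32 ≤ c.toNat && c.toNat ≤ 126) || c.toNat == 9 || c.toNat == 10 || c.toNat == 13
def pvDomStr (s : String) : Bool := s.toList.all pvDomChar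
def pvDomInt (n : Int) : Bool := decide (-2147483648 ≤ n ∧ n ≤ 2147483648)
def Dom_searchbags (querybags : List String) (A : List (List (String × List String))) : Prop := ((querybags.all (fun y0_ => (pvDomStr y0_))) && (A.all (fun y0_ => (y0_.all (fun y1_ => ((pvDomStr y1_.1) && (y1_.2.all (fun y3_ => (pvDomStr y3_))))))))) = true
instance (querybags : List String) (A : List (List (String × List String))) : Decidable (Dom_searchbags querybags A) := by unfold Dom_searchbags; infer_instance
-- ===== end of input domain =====

-- B replaces A's per-query rescan of all of A with a reverse index (content bag -> containers) built once (objective: faster).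

-- ===== PORT A =====
def searchbags (querybags : List String) (A : List (List (String × List String))) : List String :=
  querybags.foldl (fun valid query =>
    A.foldl (fun valid outerbag =>
      (PySem.Dict.ofList outerbag).keys.foldl (fun valid innerbag =>
        if query ∈ (PySem.Dict.ofList outerbag).getD innerbag [] then valid ++ [innerbag] else valid)
        valid)
      valid)
    []

-- ===== PORT B =====
def searchbags_alt (querybags : List String) (A : List (List (String × List String))) : List String :=
  let index : PySem.Dict String (List String) :=
    A.foldl (fun index outerbag =>
      (PySem.Dict.ofList outerbag).items.foldl (fun index kv =>
        (PySem.List.dedup kv.2).foldl (fun index content =>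
          index.modify content [] (· ++ [kv.1])) index)
        index)
      PySem.Dict.empty
  querybags.foldl (fun valid query => valid ++ index.getD query []) []

-- ===== PRECONDITION & SPEC =====
def Spec_searchbags (querybags : List String) (A : List (List (String × List String))) (out : List String) : Prop := out = searchbags_alt querybags A
instance (querybags : List String) (A : List (List (String × List String))) (out : List String) : Decidable (Spec_searchbags querybags A out) := by unfold Spec_searchbags; infer_instance

-- ===== CLAIM (what is proved, stated in full; the proofs are below) =====
def Claim_equal_searchbags : Prop := ∀ (querybags : List String) (A : List (List (String × List String))), Dom_searchbags querybags A → Spec_searchbags querybags A (searchbags querybags A)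

-- ===== LEMMAS AND PROOFS =====

-- per-dict contribution for one query: the keys of the dict whose content list contains the query
def pvContrib (q : String) (ob : List (String × List String)) : List String :=
  (((PySem.Dict.ofList ob).items.filter (fun kv => decide (q ∈ kv.2))).map (·.1))

theorem pv_filter_nodup_beq (l : List String) (q : String) (h : l.Nodup) :
    l.filter (fun c => c == q) = if q ∈ l then [q] else [] := by
  induction l with
  | nil => simp
  | cons a t ih =>
    simp only [List.nodup_cons] at h
    rw [List.filter_cons]
    by_cases hq : a = q
    · subst hq
      simp [ih h.2, h.1]
    · simp only [List.mem_cons]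
      simp [hq, ih h.2, Ne.symm hq]

theorem pv_inner_step (vs : List String) (k q : String) (d : PySem.Dict String (List String)) :
    ((PySem.List.dedup vs).foldl (fun d c => d.modify c [] (· ++ [k])) d).getD q []
      = d.getD q [] ++ (if q ∈ vs then [k] else []) := by
  have h1 : ((PySem.List.dedup vs).foldl (fun d c => d.modify c [] (· ++ [k])) d)
      = (((PySem.List.dedup vs).map (fun c => (c, k))).foldl (fun d p => d.modify p.1 [] (· ++ [p.2])) d) := by
    rw [List.foldl_map]
  rw [h1, PySem.Dict.getD_foldl_modify_append, List.filter_map, List.map_map]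
  rw [show ((fun (p : String × String) => p.1 == q) ∘ fun c => (c, k)) = (fun c => c == q) from rfl,
      pv_filter_nodup_beq _ _ (PySem.List.nodup_dedup vs)]
  by_cases h : q ∈ vs <;> simp [h]

theorem pv_perdict_build (l : List (String × List String)) (d : PySem.Dict String (List String)) (q : String) :
    (l.foldl (fun d kv => (PySem.List.dedup kv.2).foldl (fun d c => d.modify c [] (· ++ [kv.1])) d) d).getD q []
      = d.getD q [] ++ ((l.filter (fun kv => decide (q ∈ kv.2))).map (·.1)) := by
  induction l generalizing d with
  | nil => simp
  | cons kv t ih =>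
    rw [List.foldl_cons, ih, pv_inner_step, List.filter_cons]
    by_cases h : q ∈ kv.2 <;> simp [h]

theorem pv_index_getD (As : List (List (String × List String))) (d : PySem.Dict String (List String)) (q : String) :
    (As.foldl (fun index outerbag =>
        (PySem.Dict.ofList outerbag).items.foldl (fun index kv =>
          (PySem.List.dedup kv.2).foldl (fun index content =>
            index.modify content [] (· ++ [kv.1])) index) index) d).getD q []
      = d.getD q [] ++ As.flatMap (pvContrib q) := by
  induction As generalizing d with
  | nil => simp
  | cons ob t ih =>
    rw [List.foldl_cons, ih, pv_perdict_build, List.flatMap_cons, pvContrib, List.append_assoc]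

theorem pv_perdict_A (ob : List (String × List String)) (q : String) (valid : List String) :
    (PySem.Dict.ofList ob).keys.foldl (fun valid innerbag =>
        if q ∈ (PySem.Dict.ofList ob).getD innerbag [] then valid ++ [innerbag] else valid) valid
      = valid ++ pvContrib q ob := by
  have hnd := PySem.Dict.nodup_keys_ofList (κ := String) (ν := List String) ob
  simp only [PySem.Dict.keys]
  rw [List.foldl_map]
  have hcg : List.foldl (fun x (y : String × List String) =>
        if q ∈ (PySem.Dict.ofList ob).getD y.1 [] then x ++ [y.1] else x) valid (PySem.Dict.ofList ob).items
      = List.foldl (fun x y => if q ∈ y.2 then x ++ [y.1] else x) valid (PySem.Dict.ofList ob).items :=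
    PySem.List.foldl_congr_mem _ _ _ _
      (by rintro acc ⟨k, v⟩ hmem; rw [PySem.Dict.getD_of_mem_items _ hmem hnd])
  rw [hcg]
  exact PySem.List.foldl_append_ite (p := fun kv => q ∈ (kv : String × List String).2) (f := (·.1)) _ _

-- ===== VERDICT (by name: the statement is the Claim_ definition above) =====
theorem searchbags_spec : Claim_equal_searchbags := by
  intro querybags A _
  show searchbags querybags A = searchbags_alt querybags A
  unfold searchbags searchbags_alt
  have hB : ∀ q : String,
      (A.foldl (fun index outerbag =>
        (PySem.Dict.ofList outerbag).items.foldl (fun index kv =>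
          (PySem.List.dedup kv.2).foldl (fun index content =>
            index.modify content [] (· ++ [kv.1])) index) index) PySem.Dict.empty).getD q []
      = A.flatMap (pvContrib q) := by
    intro q
    rw [pv_index_getD]
    simp [PySem.Dict.getD_empty]
  have hA : ∀ (acc : List String) (q : String),
      A.foldl (fun valid outerbag =>
        (PySem.Dict.ofList outerbag).keys.foldl (fun valid innerbag =>
          if q ∈ (PySem.Dict.ofList outerbag).getD innerbag [] then valid ++ [innerbag] else valid)
          valid) acc = acc ++ A.flatMap (pvContrib q) := by
    intro acc q
    rw [PySem.List.foldl_congr_mem _ _ (fun valid ob => valid ++ pvContrib q ob) _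
        (by intro acc' ob _; exact pv_perdict_A ob q acc')]
    exact PySem.List.foldl_append_eq_flatMap _ _ _
  show _ = List.foldl _ [] _
  rw [PySem.List.foldl_congr_mem _ _ (fun valid q => valid ++ A.flatMap (pvContrib q)) _
      (by intro acc q _; exact hA acc q)]
  exact (PySem.List.foldl_congr_mem _ _ (fun valid q => valid ++ A.flatMap (pvContrib q)) _
      (by intro acc q _; exact congrArg (acc ++ ·) (hB q))).symm
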